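-- pv_equiv track=rewrite | github.com/Devworks8/pythonproject | a2q9.py | remove_first_four_even
-- ===== SOURCE A (Python) =====
-- def remove_first_four_even(sampleList):
--     totalIterations = 4
--     iteration = 1
--     output = []
--
--     for item in sampleList:
--         if iteration > totalIterations or not item % 2 == 0:
--             output.append(item)
--         else:
--             iteration = iteration + 1
--
--     return output
-- ===== SOURCE B (Python) =====
-- def remove_first_four_even(sampleList):
--     # Phase 1: locate indices of the first four even elements.
--     skip = set()
--     for i, item in enumerate(sampleList):
--         if item % 2 == 0:
--             skip.add(i)
--             if len(skip) == 4:
--                 break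
--     # Phase 2: rebuild the list excluding those indices.
--     return [item for i, item in enumerate(sampleList) if i not in skip]
-- ===== Notes on version B (the rewrite author's own statement) =====
-- stated objective: alternative
-- what changed: Replaces the single running-counter pass with a two-phase scheme: one pass collects the indices of the first four even elements into a set, a second pass rebuilds the list excluding those indices.
import Mathlib
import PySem

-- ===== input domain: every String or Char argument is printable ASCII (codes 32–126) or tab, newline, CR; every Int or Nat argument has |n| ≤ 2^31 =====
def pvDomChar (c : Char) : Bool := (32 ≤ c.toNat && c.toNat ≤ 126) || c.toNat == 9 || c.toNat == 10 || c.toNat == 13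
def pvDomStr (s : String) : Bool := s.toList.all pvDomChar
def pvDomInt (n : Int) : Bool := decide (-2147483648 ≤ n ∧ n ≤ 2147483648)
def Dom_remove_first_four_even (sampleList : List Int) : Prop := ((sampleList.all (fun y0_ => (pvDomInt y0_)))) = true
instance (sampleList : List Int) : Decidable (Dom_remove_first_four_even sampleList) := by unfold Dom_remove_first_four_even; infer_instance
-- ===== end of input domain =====

-- B replaces A's running-counter single pass by two passes: collect the indices of the
-- first four even elements into a set, then rebuild the list excluding those indices.

-- ===== PORT A =====
-- A: one fold over the list with state (iteration, output); keeps the item unless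
-- iteration ≤ 4 and the item is even, in which case the counter is bumped instead.
def remove_first_four_even (sampleList : List Int) : List Int :=
  (sampleList.foldl
    (fun (st : Int × List Int) item =>
      if st.1 > 4 ∨ ¬ (PySem.Int.mod item 2 == 0) then (st.1, st.2 ++ [item])
      else (st.1 + 1, st.2))
    (1, [])).2

-- ===== PORT B =====
-- Phase 1 of Source B: walk with an index, adding the index of each even element to the
-- skip set, breaking once the set has four elements.
def pvSkipB : List Int → Int → PySem.Set Int → PySem.Set Int
  | [], _, skip => skip
  | item :: rest, i, skip =>
      if PySem.Int.mod item 2 == 0 then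
        if (PySem.Set.add skip i).length == 4 then PySem.Set.add skip i
        else pvSkipB rest (i + 1) (PySem.Set.add skip i)
      else pvSkipB rest (i + 1) skip

-- Phase 2 of Source B: the comprehension over enumerate(sampleList) keeping items whose
-- index is not in the skip set.
def pvKeepB : List Int → Int → PySem.Set Int → List Int
  | [], _, _ => []
  | item :: rest, i, skip =>
      if PySem.Set.contains skip i then pvKeepB rest (i + 1) skip
      else item :: pvKeepB rest (i + 1) skip

def remove_first_four_even_alt (sampleList : List Int) : List Int :=
  pvKeepB sampleList 0 (pvSkipB sampleList 0 PySem.Set.empty)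

-- ===== PRECONDITION & SPEC =====
def Spec_remove_first_four_even (sampleList : List Int) (out : List Int) : Prop := out = remove_first_four_even_alt sampleList
instance (sampleList : List Int) (out : List Int) : Decidable (Spec_remove_first_four_even sampleList out) := by unfold Spec_remove_first_four_even; infer_instance

-- ===== CLAIM (what is proved, stated in full; the proofs are below) =====
def Claim_equal_remove_first_four_even : Prop := ∀ (sampleList : List Int), Dom_remove_first_four_even sampleList → Spec_remove_first_four_even sampleList (remove_first_four_even sampleList)

-- ===== LEMMAS AND PROOFS =====

-- Canonical form: drop the first k even elements.
def pvCanon : List Int → Nat → List Int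
  | [], _ => []
  | x :: r, k => if k ≠ 0 ∧ PySem.Int.mod x 2 == 0 then pvCanon r (k - 1) else x :: pvCanon r k

theorem pvCanon_zero (xs : List Int) : pvCanon xs 0 = xs := by
  induction xs with
  | nil => rfl
  | cons x r ih => simp [pvCanon, ih]

-- A's fold equals the canonical form.
theorem pvA_canon (xs : List Int) (iter : Int) (acc : List Int)
    (h1 : 1 ≤ iter) (h5 : iter ≤ 5) :
    (xs.foldl
      (fun (st : Int × List Int) item =>
        if st.1 > 4 ∨ ¬ (PySem.Int.mod item 2 == 0) then (st.1, st.2 ++ [item])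
        else (st.1 + 1, st.2))
      (iter, acc)).2 = acc ++ pvCanon xs (5 - iter).toNat := by
  induction xs generalizing iter acc with
  | nil => simp [pvCanon]
  | cons x r ih =>
    simp only [List.foldl_cons]
    by_cases hc : iter > 4 ∨ ¬ (PySem.Int.mod x 2 == 0)
    · rw [if_pos hc, ih iter (acc ++ [x]) h1 h5]
      have hcan : pvCanon (x :: r) (5 - iter).toNat = x :: pvCanon r (5 - iter).toNat := by
        rcases hc with h | h
        · have h0 : (5 - iter).toNat = 0 := by omega
          rw [h0]
          simp only [pvCanon]
          rw [if_neg (by simp)]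
        · simp only [pvCanon]
          rw [if_neg (fun hh => h hh.2)]
      rw [hcan]; simp
    · rw [if_neg hc]
      have h4 : ¬ iter > 4 := fun hh => hc (Or.inl hh)
      have hev : (PySem.Int.mod x 2 == 0) = true := by
        by_contra hh; exact hc (Or.inr hh)
      rw [ih (iter + 1) acc (by omega) (by omega)]
      have hk : (5 - iter).toNat = (5 - (iter + 1)).toNat + 1 := by omega
      have hcan : pvCanon (x :: r) (5 - iter).toNat = pvCanon r (5 - (iter + 1)).toNat := by
        rw [hk]
        simp only [pvCanon]
        rw [if_pos ⟨Nat.succ_ne_zero _, hev⟩]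
        simp
      rw [hcan]

-- pvSkipB only ever adds to the set.
theorem pvSkipB_mono (xs : List Int) (i j : Int) (skip : List Int)
    (h : j ∈ skip) : j ∈ pvSkipB xs i skip := by
  induction xs generalizing i skip with
  | nil => simpa [pvSkipB]
  | cons x r ih =>
    simp only [pvSkipB]
    split_ifs with h1 h2
    · simp [PySem.Set.add]; split_ifs <;> simp [h]
    · exact ih (i + 1) _ (by simp [PySem.Set.add]; split_ifs <;> simp [h])
    · exact ih (i + 1) _ h

-- Everything pvSkipB adds is ≥ the running index.
theorem pvSkipB_range (xs : List Int) (i j : Int) (skip : List Int)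
    (h : j ∈ pvSkipB xs i skip) : j ∈ skip ∨ i ≤ j := by
  induction xs generalizing i skip with
  | nil => exact Or.inl (by simpa [pvSkipB] using h)
  | cons x r ih =>
    simp only [pvSkipB] at h
    split_ifs at h with h1 h2
    · have : j ∈ skip ∨ j = i := by
        revert h; simp [PySem.Set.add]; split_ifs <;> simp_all
      rcases this with h' | h'
      · exact Or.inl h'
      · exact Or.inr (by omega)
    · rcases ih (i + 1) _ h with h' | h'
      · have : j ∈ skip ∨ j = i := by
          revert h'; simp [PySem.Set.add]; split_ifs <;> simp_all
        rcases this with h'' | h''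
        · exact Or.inl h''
        · exact Or.inr (by omega)
      · exact Or.inr (by omega)
    · rcases ih (i + 1) _ h with h' | h'
      · exact Or.inl h'
      · exact Or.inr (by omega)

-- If every member of the skip set is below the starting index, nothing is dropped.
theorem pvKeepB_all (xs : List Int) (i : Int) (skip : List Int)
    (h : ∀ j ∈ skip, j < i) : pvKeepB xs i skip = xs := by
  induction xs generalizing i with
  | nil => rfl
  | cons x r ih =>
    have hni : ¬ PySem.Set.contains skip i = true := by
      simp [PySem.Set.contains]
      intro hmem
      exact absurd (h i hmem) (by omega)
    simp only [pvKeepB, hni]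
    rw [ih (i + 1) (fun j hj => by have := h j hj; omega)]
    simp

-- Main B lemma: with capacity k left (skip already holds 4 - k indices, all < i),
-- filtering xs from index i by the final skip set drops exactly the first k evens.
theorem pvB_canon (xs : List Int) (i : Int) (skip : List Int) (k : Nat)
    (hlen : skip.length + k = 4) (hk : 1 ≤ k) (hlt : ∀ j ∈ skip, j < i) :
    pvKeepB xs i (pvSkipB xs i skip) = pvCanon xs k := by
  induction xs generalizing i skip k with
  | nil => simp [pvKeepB, pvCanon]
  | cons x r ih =>
    have hi_not_mem : i ∉ skip := fun hmem => absurd (hlt i hmem) (by omega)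
    by_cases hev : (PySem.Int.mod x 2 == 0) = true
    · -- even element: index i enters the set
      have hadd : PySem.Set.add skip i = skip ++ [i] := by
        simp [PySem.Set.add, PySem.Set.contains]
        intro hmem; exact absurd hmem hi_not_mem
      have hlen' : (PySem.Set.add skip i).length = skip.length + 1 := by
        rw [hadd]; simp
      by_cases hbreak : ((PySem.Set.add skip i).length == 4) = true
      · -- break: k = 1, set is final
        have hk1 : k = 1 := by
          have : (PySem.Set.add skip i).length = 4 := by simpa using hbreak
          omega
        have hS : pvSkipB (x :: r) i skip = PySem.Set.add skip i := by
          simp only [pvSkipB]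
          rw [if_pos hev, if_pos hbreak]
        rw [hS]
        have hiS : PySem.Set.contains (PySem.Set.add skip i) i = true := by
          simp [hadd, PySem.Set.contains]
        simp only [pvKeepB, hiS, if_pos]
        rw [pvKeepB_all r (i + 1) _ (by
          intro j hj
          rw [hadd] at hj
          simp at hj
          rcases hj with hj | hj
          · have := hlt j hj; omega
          · omega)]
        subst hk1
        simp only [pvCanon]
        rw [if_pos ⟨one_ne_zero, hev⟩, pvCanon_zero]
      · -- no break: recurse with capacity k - 1
        have hS : pvSkipB (x :: r) i skip = pvSkipB r (i + 1) (PySem.Set.add skip i) := by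
          simp only [pvSkipB]
          rw [if_pos hev, if_neg hbreak]
        rw [hS]
        have hk2 : 2 ≤ k := by
          have : (PySem.Set.add skip i).length ≠ 4 := by simpa using hbreak
          omega
        have hiS : PySem.Set.contains (pvSkipB r (i + 1) (PySem.Set.add skip i)) i = true := by
          simp only [PySem.Set.contains, List.contains_iff_mem]
          exact pvSkipB_mono r (i + 1) i _ (by rw [hadd]; simp)
        simp only [pvKeepB, hiS, if_pos]
        rw [ih (i + 1) (PySem.Set.add skip i) (k - 1) (by omega) (by omega)
          (by
            intro j hj
            rw [hadd] at hj
            simp at hj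
            rcases hj with hj | hj
            · have := hlt j hj; omega
            · omega)]
        simp only [pvCanon]
        rw [if_pos ⟨(by omega : k ≠ 0), hev⟩]
    · -- odd element: index i never enters the set
      have hS : pvSkipB (x :: r) i skip = pvSkipB r (i + 1) skip := by
        simp only [pvSkipB]
        rw [if_neg hev]
      rw [hS]
      have hiS : ¬ PySem.Set.contains (pvSkipB r (i + 1) skip) i = true := by
        simp only [PySem.Set.contains, List.contains_iff_mem]
        intro hmem
        rcases pvSkipB_range r (i + 1) i skip hmem with h' | h'
        · exact hi_not_mem h'
        · omega
      simp only [pvKeepB, hiS]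
      rw [ih (i + 1) skip k hlen hk (fun j hj => by have := hlt j hj; omega)]
      have h' : ¬ (k ≠ 0 ∧ (PySem.Int.mod x 2 == 0) = true) := fun hh => hev hh.2
      simp only [pvCanon]
      rw [if_neg h']
      simp

-- ===== VERDICT (by name: the statement is the Claim_ definition above) =====
theorem remove_first_four_even_spec : Claim_equal_remove_first_four_even := by
  intro xs _
  unfold Spec_remove_first_four_even remove_first_four_even remove_first_four_even_alt
  rw [pvA_canon xs 1 [] (by norm_num) (by norm_num)]
  rw [pvB_canon xs 0 PySem.Set.empty 4 (by simp [PySem.Set.empty]) (by norm_num)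
    (by intro j hj; simp [PySem.Set.empty] at hj)]
  norm_num
  rfl
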